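-- pv_equiv track=rewrite | github.com/KikaXiaoYu/CSC4001_Project_24Spring | 3_dataflow_analysis/da.py | getBlockOut
-- ===== SOURCE A (Python) =====
-- def doDeclare(p_cur_def: int, p_line_num: int,
--               r_tokens_lst: list, r_declares_res: dict) -> int:
--     '''
--     based on Declare statement, kill dummy and other def
--     set the def of cur line and return the def_res
--     '''
--     var_name = r_tokens_lst[2]
--     def_res = p_cur_def
--     # kill the dummy
--     dummy_idx = int(var_name[1:], 10)
--     def_res &= ~(1 << dummy_idx)
--
--     for def_line, bit_idx in r_declares_res[var_name].items():
--         # since all declaration statements have been checked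
--         # var_name is guaranteed to be exist
--         if def_line == p_line_num:  # set the definition
--             def_res |= 1 << bit_idx
--         else:  # kill other definition
--             def_res &= ~(1 << bit_idx)
--     return def_res
--
-- def doDestroy(p_cur_def: int, p_line_num: int,
--               r_tokens_lst: list, r_declares_res: dict) -> int:
--     '''
--     based on Destroy statement, set dummy and kill other def
--     return the def_res
--     '''
--     var_name = r_tokens_lst[1]
--     def_res = p_cur_def
--     # set the dummy
--     dummy_idx = int(var_name[1:], 10)
--     def_res |= 1 << dummy_idx
--     # kill all definitions
--     if (var_name not in r_declares_res):
--         # since it may destroy some not exist var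
--         # need to check the var first and init it
--         r_declares_res[var_name] = dict()
--     for _, bit_idx in r_declares_res[var_name].items():
--         def_res &= ~(1 << bit_idx)
--     return def_res
--
-- def getBlockOut(p_start_line: int, p_end_line: int, p_block_in: int,
--                 r_pig_lines: list, r_declares_res: dict) -> int:
--     '''
--     based on blocks and block in, return the block out
--     '''
--     block_out_res = p_block_in
--     for i in range(p_start_line, p_end_line):
--         line = r_pig_lines[i]
--         tokens_lst = line.strip().split(" ")
--         statement_type = tokens_lst[0]
--         if (statement_type == 'D'):
--             block_out_res = doDeclare(
--                 block_out_res, i, tokens_lst, r_declares_res)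
--         elif (statement_type == 'R'):
--             block_out_res = doDestroy(
--                 block_out_res, i, tokens_lst, r_declares_res)
--     return block_out_res
-- ===== SOURCE B (Python) =====
-- def getBlockOut(p_start_line: int, p_end_line: int, p_block_in: int,
--                 r_pig_lines: list, r_declares_res: dict) -> int:
--     '''
--     Compose the whole block's transfer function as a single GEN/KILL mask
--     pair built in one pass, then apply it to the block-in once at the end.
--     '''
--     gen = 0
--     kill = 0
--     for i in range(p_start_line, p_end_line):
--         tokens_lst = r_pig_lines[i].strip().split(" ")
--         statement_type = tokens_lst[0]
--         if statement_type == 'D':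
--             var_name = tokens_lst[2]
--             mask = 1 << int(var_name[1:], 10)
--             gen &= ~mask
--             kill |= mask
--             for def_line, bit_idx in r_declares_res[var_name].items():
--                 mask = 1 << bit_idx
--                 if def_line == i:
--                     gen |= mask
--                 else:
--                     gen &= ~mask
--                 kill |= mask
--         elif statement_type == 'R':
--             var_name = tokens_lst[1]
--             mask = 1 << int(var_name[1:], 10)
--             gen |= mask
--             kill |= mask
--             if var_name not in r_declares_res:
--                 r_declares_res[var_name] = dict()
--             for bit_idx in r_declares_res[var_name].values():
--                 mask = 1 << bit_idx
--                 gen &= ~mask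
--                 kill |= mask
--     return (p_block_in & ~kill) | gen
-- ===== Notes on version B (the rewrite author's own statement) =====
-- stated objective: alternative
-- what changed: B composes the whole block's effect into a single GEN/KILL bitmask pair built in one forward pass (per-bit update rules on two accumulators) and applies it to the block-in once at the end, instead of threading the running reaching-definitions value through the per-statement doDeclare/doDestroy helpers.
import Mathlib
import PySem

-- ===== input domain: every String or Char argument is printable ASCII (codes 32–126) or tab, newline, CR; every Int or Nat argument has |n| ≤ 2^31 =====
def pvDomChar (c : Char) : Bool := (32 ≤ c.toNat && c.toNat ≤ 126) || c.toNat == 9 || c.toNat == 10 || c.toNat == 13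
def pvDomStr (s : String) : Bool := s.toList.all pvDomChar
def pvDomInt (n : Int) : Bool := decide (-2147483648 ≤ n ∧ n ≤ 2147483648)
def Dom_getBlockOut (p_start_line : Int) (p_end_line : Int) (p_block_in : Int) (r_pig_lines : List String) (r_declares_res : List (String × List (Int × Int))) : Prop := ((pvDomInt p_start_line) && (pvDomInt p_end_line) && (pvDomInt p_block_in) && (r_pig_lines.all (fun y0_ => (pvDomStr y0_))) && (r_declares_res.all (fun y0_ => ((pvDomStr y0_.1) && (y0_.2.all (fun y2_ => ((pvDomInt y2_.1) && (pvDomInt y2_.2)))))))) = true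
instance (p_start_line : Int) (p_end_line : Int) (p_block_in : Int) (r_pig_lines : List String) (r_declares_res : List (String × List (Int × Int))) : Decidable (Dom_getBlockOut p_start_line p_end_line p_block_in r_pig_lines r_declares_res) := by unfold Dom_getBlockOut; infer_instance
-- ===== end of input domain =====

-- B rebuilds the block's effect as one GEN/KILL mask pair built in a single pass and applied
-- to the block-in once at the end, instead of threading the running value through per-statement
-- helpers (objective: alternative decomposition, same cost). A mutates r_declares_res in place
-- (doDestroy inserts missing vars with an empty dict); B performs the same mutation; the
-- equivalence proved here is about the return value.

-- ===== PORT A =====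
-- r_declares_res[v] (first-match association-list lookup); the Python dict mutation
-- performed by doDestroy only ever inserts an EMPTY dict for a missing key, which is
-- indistinguishable (for the returned value) from the key staying absent, so the ports
-- read the original dict with a [] default instead of threading the mutated dict.
def doDeclare (p_cur_def : Int) (p_line_num : Int) (r_tokens_lst : List String) (r_declares_res : List (String × List (Int × Int))) : Int :=
  let var_name := (PySem.List.pyGet? r_tokens_lst 2).getD ""
  let dummy_idx := (PySem.Int.ofStr? (PySem.Str.slice var_name (some 1) none)).getD 0
  let def_res := PySem.Int.band p_cur_def (Int.not ((1 : Int) <<< dummy_idx.toNat))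
  ((r_declares_res.lookup var_name).getD []).foldl
    (fun def_res p =>
      if p.1 == p_line_num then PySem.Int.bor def_res ((1 : Int) <<< p.2.toNat)
      else PySem.Int.band def_res (Int.not ((1 : Int) <<< p.2.toNat))) def_res

def doDestroy (p_cur_def : Int) (p_line_num : Int) (r_tokens_lst : List String) (r_declares_res : List (String × List (Int × Int))) : Int :=
  let var_name := (PySem.List.pyGet? r_tokens_lst 1).getD ""
  let dummy_idx := (PySem.Int.ofStr? (PySem.Str.slice var_name (some 1) none)).getD 0
  let def_res := PySem.Int.bor p_cur_def ((1 : Int) <<< dummy_idx.toNat)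
  ((r_declares_res.lookup var_name).getD []).foldl
    (fun def_res p => PySem.Int.band def_res (Int.not ((1 : Int) <<< p.2.toNat))) def_res

def getBlockOut (p_start_line : Int) (p_end_line : Int) (p_block_in : Int) (r_pig_lines : List String) (r_declares_res : List (String × List (Int × Int))) : Int :=
  (PySem.List.pyRange p_start_line p_end_line 1).foldl
    (fun block_out_res i =>
      let line := (PySem.List.pyGet? r_pig_lines i).getD ""
      let tokens_lst := (PySem.Str.split? (PySem.Str.strip line) " ").getD []
      let statement_type := (PySem.List.pyGet? tokens_lst 0).getD ""
      if statement_type == "D" then doDeclare block_out_res i tokens_lst r_declares_res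
      else if statement_type == "R" then doDestroy block_out_res i tokens_lst r_declares_res
      else block_out_res) p_block_in

-- ===== PORT B =====
def getBlockOut_alt (p_start_line : Int) (p_end_line : Int) (p_block_in : Int) (r_pig_lines : List String) (r_declares_res : List (String × List (Int × Int))) : Int :=
  let gk := (PySem.List.pyRange p_start_line p_end_line 1).foldl
    (fun (gk : Int × Int) i =>
      let line := (PySem.List.pyGet? r_pig_lines i).getD ""
      let tokens_lst := (PySem.Str.split? (PySem.Str.strip line) " ").getD []
      let statement_type := (PySem.List.pyGet? tokens_lst 0).getD ""
      if statement_type == "D" then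
        let var_name := (PySem.List.pyGet? tokens_lst 2).getD ""
        let mask := (1 : Int) <<< ((PySem.Int.ofStr? (PySem.Str.slice var_name (some 1) none)).getD 0).toNat
        let gk1 := (PySem.Int.band gk.1 (Int.not mask), PySem.Int.bor gk.2 mask)
        ((r_declares_res.lookup var_name).getD []).foldl
          (fun (gk : Int × Int) p =>
            let mb := (1 : Int) <<< p.2.toNat
            if p.1 == i then (PySem.Int.bor gk.1 mb, PySem.Int.bor gk.2 mb)
            else (PySem.Int.band gk.1 (Int.not mb), PySem.Int.bor gk.2 mb)) gk1
      else if statement_type == "R" then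
        let var_name := (PySem.List.pyGet? tokens_lst 1).getD ""
        let mask := (1 : Int) <<< ((PySem.Int.ofStr? (PySem.Str.slice var_name (some 1) none)).getD 0).toNat
        let gk1 := (PySem.Int.bor gk.1 mask, PySem.Int.bor gk.2 mask)
        ((r_declares_res.lookup var_name).getD []).foldl
          (fun (gk : Int × Int) p =>
            let mb := (1 : Int) <<< p.2.toNat
            (PySem.Int.band gk.1 (Int.not mb), PySem.Int.bor gk.2 mb)) gk1
      else gk) ((0 : Int), (0 : Int))
  PySem.Int.bor (PySem.Int.band p_block_in (Int.not gk.2)) gk.1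

-- ===== PRECONDITION & SPEC =====
-- var name must parse as a nonnegative shift amount (else Python's int()/<< raises)
def pvVarOK (var : String) : Bool :=
  match PySem.Int.ofStr? (PySem.Str.slice var (some 1) none) with
  | some d => decide (0 ≤ d)
  | none => false

-- every recorded bit index must be a nonnegative shift amount (else 1 << bit raises)
def pvBitsOK (entries : List (Int × Int)) : Bool := entries.all (fun p => decide (0 ≤ p.2))

-- line j is an 'R <var> …' statement (an earlier destroy inserts <var> into the dict)
def pvDestroys (r_pig_lines : List String) (j : Int) (var : String) : Bool :=
  match PySem.List.pyGet? r_pig_lines j with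
  | none => false
  | some line =>
    let tokens_lst := (PySem.Str.split? (PySem.Str.strip line) " ").getD []
    ((PySem.List.pyGet? tokens_lst 0).getD "" == "R") && ((PySem.List.pyGet? tokens_lst 1).getD "" == var)

-- line i executes without raising: index in range; a 'D' line needs a third token whose
-- variable parses, is a key (or was destroyed earlier in the block, which inserts it) and
-- has nonnegative bit indices; an 'R' line needs a second token that parses likewise
def pvLineOK (p_start_line : Int) (r_pig_lines : List String) (r_declares_res : List (String × List (Int × Int))) (i : Int) : Bool :=
  match PySem.List.pyGet? r_pig_lines i with
  | none => false
  | some line =>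
    let tokens_lst := (PySem.Str.split? (PySem.Str.strip line) " ").getD []
    let statement_type := (PySem.List.pyGet? tokens_lst 0).getD ""
    if statement_type == "D" then
      match PySem.List.pyGet? tokens_lst 2 with
      | none => false
      | some var =>
        pvVarOK var &&
          (match r_declares_res.lookup var with
           | some entries => pvBitsOK entries
           | none => (PySem.List.pyRange p_start_line i 1).any (fun j => pvDestroys r_pig_lines j var))
    else if statement_type == "R" then
      match PySem.List.pyGet? tokens_lst 1 with
      | none => false
      | some var => pvVarOK var && pvBitsOK ((r_declares_res.lookup var).getD [])
    else true

-- Pre_ excludes exactly (a) inputs on which the Python raises (IndexError on the line or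
-- token lookup, ValueError from int(...) or a negative shift count, KeyError on a 'D' for a
-- variable neither declared nor destroyed earlier in the block) and (b) association lists
-- with duplicate keys, which no Python dict can represent.
-- (a non-empty range must lie inside [-len, len) — that is exactly what "every r_pig_lines[i]
-- is in range" means for the contiguous range(p_start_line, p_end_line))
def Pre_getBlockOut (p_start_line : Int) (p_end_line : Int) (p_block_in : Int) (r_pig_lines : List String) (r_declares_res : List (String × List (Int × Int))) : Prop :=
  ((decide (r_declares_res.map Prod.fst).Nodup) &&
   (r_declares_res.all (fun p => decide (p.2.map Prod.fst).Nodup)) &&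
   (decide (p_end_line ≤ p_start_line) ||
    (decide (-(r_pig_lines.length : Int) ≤ p_start_line) &&
     decide (p_end_line ≤ (r_pig_lines.length : Int)) &&
     (PySem.List.pyRange p_start_line p_end_line 1).all
       (fun i => pvLineOK p_start_line r_pig_lines r_declares_res i)))) = true
instance (p_start_line : Int) (p_end_line : Int) (p_block_in : Int) (r_pig_lines : List String) (r_declares_res : List (String × List (Int × Int))) : Decidable (Pre_getBlockOut p_start_line p_end_line p_block_in r_pig_lines r_declares_res) := by unfold Pre_getBlockOut; infer_instance

def pvWitness_getBlockOut : Int × Int × Int × List String × (List (String × List (Int × Int))) :=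
  (0, 2, 5, ["D x v1", "R v0"], [("v1", [(0, 3)])])

def Spec_getBlockOut (p_start_line : Int) (p_end_line : Int) (p_block_in : Int) (r_pig_lines : List String) (r_declares_res : List (String × List (Int × Int))) (out : Int) : Prop := out = getBlockOut_alt p_start_line p_end_line p_block_in r_pig_lines r_declares_res
instance (p_start_line : Int) (p_end_line : Int) (p_block_in : Int) (r_pig_lines : List String) (r_declares_res : List (String × List (Int × Int))) (out : Int) : Decidable (Spec_getBlockOut p_start_line p_end_line p_block_in r_pig_lines r_declares_res out) := by unfold Spec_getBlockOut; infer_instance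

-- ===== CLAIM (what is proved, stated in full; the proofs are below) =====
def Claim_equal_getBlockOut : Prop := ∀ (p_start_line : Int) (p_end_line : Int) (p_block_in : Int) (r_pig_lines : List String) (r_declares_res : List (String × List (Int × Int))), Dom_getBlockOut p_start_line p_end_line p_block_in r_pig_lines r_declares_res → Pre_getBlockOut p_start_line p_end_line p_block_in r_pig_lines r_declares_res → Spec_getBlockOut p_start_line p_end_line p_block_in r_pig_lines r_declares_res (getBlockOut p_start_line p_end_line p_block_in r_pig_lines r_declares_res)

-- ===== LEMMAS AND PROOFS =====

-- bridges between PySem's Python-exact bitwise operations and Mathlib's Int.land/lor/lnot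
theorem pv_ldiff_add_and (m n : Nat) : m.ldiff n + (m &&& n) = m := by
  induction m using Nat.binaryRec generalizing n with
  | zero => simp [Nat.ldiff]
  | bit b m ih =>
    rw [← Nat.bit_testBit_zero_shiftRight_one n, Nat.ldiff_bit, Nat.land_bit]
    have h := ih (n >>> 1)
    cases b <;> cases n.testBit 0 <;> simp [Nat.bit] <;> omega

theorem pv_key_sub_and (m n : Nat) : m - (m &&& n) = m.ldiff n := by
  have := pv_ldiff_add_and m n; omega

theorem pv_band_eq_land (a b : Int) : PySem.Int.band a b = Int.land a b := by
  cases a with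
  | ofNat m =>
    cases b with
    | ofNat n => simp [PySem.Int.band, Int.land]
    | negSucc n =>
      simp [PySem.Int.band, Int.land, Int.negSucc_eq, pv_key_sub_and]
      all_goals first | (intro h; omega) | (split_ifs <;> omega)
  | negSucc m =>
    cases b with
    | ofNat n =>
      simp [PySem.Int.band, Int.land, Int.negSucc_eq, pv_key_sub_and]
      all_goals first | (intro h; omega) | (split_ifs <;> omega)
    | negSucc n =>
      simp [PySem.Int.band, Int.land, Int.negSucc_eq]
      all_goals first | (intro h; omega) | (split_ifs <;> omega)

theorem pv_bor_eq_lor (a b : Int) : PySem.Int.bor a b = Int.lor a b := by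
  cases a with
  | ofNat m =>
    cases b with
    | ofNat n => simp [PySem.Int.bor, Int.lor]
    | negSucc n =>
      simp [PySem.Int.bor, Int.lor, Int.negSucc_eq, pv_key_sub_and]
      all_goals first | (intro h; omega) | (split_ifs <;> omega)
  | negSucc m =>
    cases b with
    | ofNat n =>
      simp [PySem.Int.bor, Int.lor, Int.negSucc_eq, pv_key_sub_and]
      all_goals first | (intro h; omega) | (split_ifs <;> omega)
    | negSucc n =>
      simp [PySem.Int.bor, Int.lor, Int.negSucc_eq]
      all_goals first | (intro h; omega) | (split_ifs <;> omega)

theorem pv_not_eq_lnot (a : Int) : Int.not a = Int.lnot a := by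
  cases a <;> rfl

theorem pv_int_eq_of_testBit_eq {a b : Int} (h : ∀ k, a.testBit k = b.testBit k) : a = b := by
  cases a with
  | ofNat m =>
    cases b with
    | ofNat n =>
      have : ∀ k, m.testBit k = n.testBit k := fun k => by simpa [Int.testBit] using h k
      exact congrArg Int.ofNat (Nat.eq_of_testBit_eq this)
    | negSucc n =>
      exfalso
      have hk := h (max m n)
      have hm : m.testBit (max m n) = false :=
        Nat.testBit_eq_false_of_lt (lt_of_lt_of_le (Nat.lt_two_pow_self) (Nat.pow_le_pow_right (by norm_num) (le_max_left m n)))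
      have hn : n.testBit (max m n) = false :=
        Nat.testBit_eq_false_of_lt (lt_of_lt_of_le (Nat.lt_two_pow_self) (Nat.pow_le_pow_right (by norm_num) (le_max_right m n)))
      simp [Int.testBit, hm, hn] at hk
  | negSucc m =>
    cases b with
    | ofNat n =>
      exfalso
      have hk := h (max m n)
      have hm : m.testBit (max m n) = false :=
        Nat.testBit_eq_false_of_lt (lt_of_lt_of_le (Nat.lt_two_pow_self) (Nat.pow_le_pow_right (by norm_num) (le_max_left m n)))
      have hn : n.testBit (max m n) = false :=
        Nat.testBit_eq_false_of_lt (lt_of_lt_of_le (Nat.lt_two_pow_self) (Nat.pow_le_pow_right (by norm_num) (le_max_right m n)))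
      simp [Int.testBit, hm, hn] at hk
    | negSucc n =>
      have : ∀ k, m.testBit k = n.testBit k := fun k => by
        have := h k; simpa [Int.testBit] using this
      exact congrArg Int.negSucc (Nat.eq_of_testBit_eq this)

-- "apply the composed gen/kill pair to the block-in": B's invariant shape
def pvOut (x : Int) (gk : Int × Int) : Int := PySem.Int.bor (PySem.Int.band x (Int.not gk.2)) gk.1

theorem pvOut_or (x m : Int) (gk : Int × Int) :
    PySem.Int.bor (pvOut x gk) m = pvOut x (PySem.Int.bor gk.1 m, PySem.Int.bor gk.2 m) := by
  apply pv_int_eq_of_testBit_eq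
  intro k
  simp only [pvOut, pv_band_eq_land, pv_bor_eq_lor, pv_not_eq_lnot,
    Int.testBit_land, Int.testBit_lor, Int.testBit_lnot]
  cases x.testBit k <;> cases gk.1.testBit k <;> cases gk.2.testBit k <;> cases m.testBit k <;> rfl

theorem pvOut_andnot (x m : Int) (gk : Int × Int) :
    PySem.Int.band (pvOut x gk) (Int.not m) =
      pvOut x (PySem.Int.band gk.1 (Int.not m), PySem.Int.bor gk.2 m) := by
  apply pv_int_eq_of_testBit_eq
  intro k
  simp only [pvOut, pv_band_eq_land, pv_bor_eq_lor, pv_not_eq_lnot,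
    Int.testBit_land, Int.testBit_lor, Int.testBit_lnot]
  cases x.testBit k <;> cases gk.1.testBit k <;> cases gk.2.testBit k <;> cases m.testBit k <;> rfl

theorem pvOut_zero (x : Int) : pvOut x (0, 0) = x := by
  apply pv_int_eq_of_testBit_eq
  intro k
  simp only [pvOut, pv_band_eq_land, pv_bor_eq_lor, pv_not_eq_lnot,
    Int.testBit_land, Int.testBit_lor, Int.testBit_lnot]
  cases x.testBit k <;> simp [Int.testBit]

-- the inner entry folds of the two ports preserve the invariant
theorem pv_fold_D (i : Int) (entries : List (Int × Int)) :
    ∀ (x : Int) (gk : Int × Int),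
      entries.foldl
        (fun def_res p =>
          if p.1 == i then PySem.Int.bor def_res ((1 : Int) <<< p.2.toNat)
          else PySem.Int.band def_res (Int.not ((1 : Int) <<< p.2.toNat))) (pvOut x gk) =
      pvOut x (entries.foldl
        (fun (gk : Int × Int) p =>
          let mb := (1 : Int) <<< p.2.toNat
          if p.1 == i then (PySem.Int.bor gk.1 mb, PySem.Int.bor gk.2 mb)
          else (PySem.Int.band gk.1 (Int.not mb), PySem.Int.bor gk.2 mb)) gk) := by
  induction entries with
  | nil => intro x gk; rfl
  | cons p tl ih =>
    intro x gk
    simp only [List.foldl_cons]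
    by_cases hp : (p.1 == i) = true
    · simp only [hp, if_true, pvOut_or]
      exact ih x _
    · simp only [hp, if_false, Bool.false_eq_true, pvOut_andnot]
      exact ih x _

theorem pv_fold_R (entries : List (Int × Int)) :
    ∀ (x : Int) (gk : Int × Int),
      entries.foldl
        (fun def_res p => PySem.Int.band def_res (Int.not ((1 : Int) <<< p.2.toNat))) (pvOut x gk) =
      pvOut x (entries.foldl
        (fun (gk : Int × Int) p =>
          let mb := (1 : Int) <<< p.2.toNat
          (PySem.Int.band gk.1 (Int.not mb), PySem.Int.bor gk.2 mb)) gk) := by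
  induction entries with
  | nil => intro x gk; rfl
  | cons p tl ih =>
    intro x gk
    simp only [List.foldl_cons, pvOut_andnot]
    exact ih x _

-- the outer loops of the two ports preserve the invariant, line by line
theorem pv_fold_main (r_pig_lines : List String) (r_declares_res : List (String × List (Int × Int))) (l : List Int) :
    ∀ (x : Int) (gk : Int × Int),
      l.foldl
        (fun block_out_res i =>
          let line := (PySem.List.pyGet? r_pig_lines i).getD ""
          let tokens_lst := (PySem.Str.split? (PySem.Str.strip line) " ").getD []
          let statement_type := (PySem.List.pyGet? tokens_lst 0).getD ""
          if statement_type == "D" then doDeclare block_out_res i tokens_lst r_declares_res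
          else if statement_type == "R" then doDestroy block_out_res i tokens_lst r_declares_res
          else block_out_res) (pvOut x gk) =
      pvOut x (l.foldl
        (fun (gk : Int × Int) i =>
          let line := (PySem.List.pyGet? r_pig_lines i).getD ""
          let tokens_lst := (PySem.Str.split? (PySem.Str.strip line) " ").getD []
          let statement_type := (PySem.List.pyGet? tokens_lst 0).getD ""
          if statement_type == "D" then
            let var_name := (PySem.List.pyGet? tokens_lst 2).getD ""
            let mask := (1 : Int) <<< ((PySem.Int.ofStr? (PySem.Str.slice var_name (some 1) none)).getD 0).toNat
            let gk1 := (PySem.Int.band gk.1 (Int.not mask), PySem.Int.bor gk.2 mask)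
            ((r_declares_res.lookup var_name).getD []).foldl
              (fun (gk : Int × Int) p =>
                let mb := (1 : Int) <<< p.2.toNat
                if p.1 == i then (PySem.Int.bor gk.1 mb, PySem.Int.bor gk.2 mb)
                else (PySem.Int.band gk.1 (Int.not mb), PySem.Int.bor gk.2 mb)) gk1
          else if statement_type == "R" then
            let var_name := (PySem.List.pyGet? tokens_lst 1).getD ""
            let mask := (1 : Int) <<< ((PySem.Int.ofStr? (PySem.Str.slice var_name (some 1) none)).getD 0).toNat
            let gk1 := (PySem.Int.bor gk.1 mask, PySem.Int.bor gk.2 mask)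
            ((r_declares_res.lookup var_name).getD []).foldl
              (fun (gk : Int × Int) p =>
                let mb := (1 : Int) <<< p.2.toNat
                (PySem.Int.band gk.1 (Int.not mb), PySem.Int.bor gk.2 mb)) gk1
          else gk) gk) := by
  induction l with
  | nil => intro x gk; rfl
  | cons i tl ih =>
    intro x gk
    simp only [List.foldl_cons]
    generalize (PySem.List.pyGet? r_pig_lines i).getD "" = line
    generalize (PySem.Str.split? (PySem.Str.strip line) " ").getD [] = tokens_lst
    by_cases hD : ((PySem.List.pyGet? tokens_lst 0).getD "" == "D") = true
    · simp only [hD, if_true]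
      rw [show doDeclare (pvOut x gk) i tokens_lst r_declares_res =
        (((r_declares_res.lookup ((PySem.List.pyGet? tokens_lst 2).getD "")).getD []).foldl
          (fun def_res p =>
            if p.1 == i then PySem.Int.bor def_res ((1 : Int) <<< p.2.toNat)
            else PySem.Int.band def_res (Int.not ((1 : Int) <<< p.2.toNat)))
          (PySem.Int.band (pvOut x gk)
            (Int.not ((1 : Int) <<< ((PySem.Int.ofStr? (PySem.Str.slice ((PySem.List.pyGet? tokens_lst 2).getD "") (some 1) none)).getD 0).toNat)))) from rfl]
      rw [pvOut_andnot, pv_fold_D]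
      exact ih x _
    · by_cases hR : ((PySem.List.pyGet? tokens_lst 0).getD "" == "R") = true
      · simp only [hD, hR, if_true, Bool.false_eq_true, if_false]
        rw [show doDestroy (pvOut x gk) i tokens_lst r_declares_res =
          (((r_declares_res.lookup ((PySem.List.pyGet? tokens_lst 1).getD "")).getD []).foldl
            (fun def_res p => PySem.Int.band def_res (Int.not ((1 : Int) <<< p.2.toNat)))
            (PySem.Int.bor (pvOut x gk)
              ((1 : Int) <<< ((PySem.Int.ofStr? (PySem.Str.slice ((PySem.List.pyGet? tokens_lst 1).getD "") (some 1) none)).getD 0).toNat))) from rfl]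
        rw [pvOut_or, pv_fold_R]
        exact ih x _
      · simp only [hD, hR, Bool.false_eq_true, if_false]
        exact ih x gk

-- ===== VERDICT (by name: the statement is the Claim_ definition above) =====
theorem getBlockOut_spec : Claim_equal_getBlockOut := by
  intro p_start_line p_end_line p_block_in r_pig_lines r_declares_res _ _
  unfold Spec_getBlockOut getBlockOut getBlockOut_alt
  have h := pv_fold_main r_pig_lines r_declares_res
    (PySem.List.pyRange p_start_line p_end_line 1) p_block_in (0, 0)
  rw [pvOut_zero] at h
  exact h
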